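-- pv_equiv track=rewrite | github.com/coandco/advent2025 | advent2025_day03.py | leftmost_largest
-- ===== SOURCE A (Python) =====
-- def leftmost_largest(digits: list[int]) -> tuple[int, int]:
--     max_digit = min_pos = -1
--     for i, digit in enumerate(digits):
--         if digit > max_digit:
--             min_pos, max_digit = i, int(digit)
--         if max_digit == 9:
--             break
--     return min_pos, max_digit
-- ===== SOURCE B (Python) =====
-- def leftmost_largest(digits: list[int]) -> tuple[int, int]:
--     if not digits:
--         return (-1, -1)
--     m = max(digits)
--     return (digits.index(m), m)
-- ===== Notes on version B (the rewrite author's own statement) =====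
-- stated objective: simpler
-- what changed: A's fused accumulator loop with an early break at 9 is replaced by guarding the empty list and then two library passes, max() followed by list.index().
-- intended difference: On non-empty lists whose elements are all <= -1 A's sentinel leaks and it returns (-1, -1), and on lists where a 9 preceded only by smaller elements hides a later element > 9 A's early break returns that 9 and its position; B returns the actual leftmost maximum with its true position in both cases, which is what the function's name promises (both arise only outside the 0-9 digit inputs the function was written for). — e.g. on leftmost_largest([9, 15]): A returns (0, 9), B returns (1, 15)
import Mathlib
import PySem

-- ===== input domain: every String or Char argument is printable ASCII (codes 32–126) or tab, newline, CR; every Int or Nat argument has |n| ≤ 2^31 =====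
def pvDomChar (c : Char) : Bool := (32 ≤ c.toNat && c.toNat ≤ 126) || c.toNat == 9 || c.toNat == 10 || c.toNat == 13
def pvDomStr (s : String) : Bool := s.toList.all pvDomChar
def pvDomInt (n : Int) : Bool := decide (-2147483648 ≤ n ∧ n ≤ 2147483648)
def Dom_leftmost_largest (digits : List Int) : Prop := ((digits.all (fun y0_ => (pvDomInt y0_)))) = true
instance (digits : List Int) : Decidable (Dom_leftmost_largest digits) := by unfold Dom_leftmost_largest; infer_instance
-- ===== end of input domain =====

-- B replaces A's fused accumulator loop (with its early break at 9) by an empty-list guard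
-- followed by two library passes, max() then list.index(): simpler decomposition, same O(n).

-- ===== PORT A =====
-- the for-loop with its (min_pos, max_digit) accumulators and the 'break' at 9
def lmLoop : List Int → Int → Int → Int → Int × Int
  | [], min_pos, max_digit, _ => (min_pos, max_digit)
  | d :: rest, min_pos, max_digit, i =>
    let st := if max_digit < d then (i, d) else (min_pos, max_digit)
    if st.2 = 9 then st else lmLoop rest st.1 st.2 (i + 1)

def leftmost_largest (digits : List Int) : Int × Int :=
  lmLoop digits (-1) (-1) 0

-- ===== PORT B =====
def leftmost_largest_alt (digits : List Int) : Int × Int :=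
  if digits = [] then (-1, -1)
  else
    match PySem.List.max? digits (fun y => y) with   -- max(digits); some m since digits ≠ []
    | none => (-1, -1)                               -- unreachable for nonempty input
    | some m => ((((PySem.List.index? digits m).getD 0 : Nat) : Int), m)  -- digits.index(m)

-- ===== PRECONDITION & SPEC =====
-- On non-empty lists whose elements are all ≤ -1 A's sentinel leaks and it returns (-1, -1),
-- and on lists where a 9 preceded only by smaller elements hides a later element > 9 A's early
-- break returns that 9 and its position; B returns the actual leftmost maximum with its true
-- position in both cases, which is what the function's name promises.
def D_leftmost_largest (digits : List Int) : Prop :=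
  digits ≠ [] ∧
    ((∀ d ∈ digits, d ≤ -1) ∨
     ∃ i < digits.length, digits.getD i 0 = 9 ∧ (∀ k < i, digits.getD k 0 < 9) ∧
       ∃ j < digits.length, i < j ∧ 9 < digits.getD j 0)
instance (digits : List Int) : Decidable (D_leftmost_largest digits) := by
  unfold D_leftmost_largest; infer_instance

def Spec_leftmost_largest (digits : List Int) (out : Int × Int) : Prop :=
  ¬ D_leftmost_largest digits → out = leftmost_largest_alt digits
instance (digits : List Int) (out : Int × Int) : Decidable (Spec_leftmost_largest digits out) := by
  unfold Spec_leftmost_largest; infer_instance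

def pvDiffWitness_leftmost_largest : List Int := [9, 15]
def pvDiffWitnessOut_leftmost_largest : (Int × Int) × (Int × Int) := ((0, 9), (1, 15))

-- ===== CLAIM (what is proved, stated in full; the proofs are below) =====
def Claim_unchanged_leftmost_largest : Prop := ∀ (digits : List Int), Dom_leftmost_largest digits → Spec_leftmost_largest digits (leftmost_largest digits)
def Claim_changed_leftmost_largest : Prop := Dom_leftmost_largest (pvDiffWitness_leftmost_largest) ∧ D_leftmost_largest (pvDiffWitness_leftmost_largest) ∧ leftmost_largest (pvDiffWitness_leftmost_largest) = pvDiffWitnessOut_leftmost_largest.1 ∧ leftmost_largest_alt (pvDiffWitness_leftmost_largest) = pvDiffWitnessOut_leftmost_largest.2 ∧ pvDiffWitnessOut_leftmost_largest.1 ≠ pvDiffWitnessOut_leftmost_largest.2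
def Claim_exact_leftmost_largest : Prop := ∀ (digits : List Int), Dom_leftmost_largest digits → D_leftmost_largest digits → leftmost_largest digits ≠ leftmost_largest_alt digits

-- ===== LEMMAS AND PROOFS =====

-- loop without the break
def loopN : List Int → Int → Int → Int → Int × Int
  | [], pos, mx, _ => (pos, mx)
  | d :: rest, pos, mx, i =>
    if mx < d then loopN rest i d (i + 1) else loopN rest pos mx (i + 1)

-- truncation A's break effectively applies: cut after a 9 that no earlier element ≥ 9 precedes
def truncAt9 : List Int → List Int
  | [] => []
  | d :: rest => if d = 9 then [9] else if 9 < d then d :: rest else d :: truncAt9 rest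

theorem lmLoop_high (ds : List Int) : ∀ pos mx i, 9 < mx →
    lmLoop ds pos mx i = loopN ds pos mx i := by
  induction ds with
  | nil => intro pos mx i _; rfl
  | cons d rest ih =>
    intro pos mx i h
    simp only [lmLoop, loopN]
    by_cases hd : mx < d
    · simp only [if_pos hd]
      have : ¬ ((i, d).2 = 9) := by simp; omega
      simp only [this, if_false]
      exact ih i d (i + 1) (by omega)
    · simp only [if_neg hd]
      have : ¬ ((pos, mx).2 = 9) := by simp; omega
      simp only [this, if_false]
      exact ih pos mx (i + 1) h

theorem lmLoop_low (ds : List Int) : ∀ pos mx i, mx < 9 →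
    lmLoop ds pos mx i = loopN (truncAt9 ds) pos mx i := by
  induction ds with
  | nil => intro pos mx i _; rfl
  | cons d rest ih =>
    intro pos mx i h
    by_cases h9 : d = 9
    · subst h9
      simp [lmLoop, truncAt9, loopN, h]
    · by_cases hgt : 9 < d
      · simp only [lmLoop, truncAt9, loopN, if_neg h9, if_pos hgt]
        have hlt : mx < d := by omega
        simp only [if_pos hlt]
        have : ¬ ((i, d).2 = 9) := by simp; omega
        simp only [this, if_false]
        exact lmLoop_high rest i d (i + 1) (by omega)
      · simp only [lmLoop, truncAt9, loopN, if_neg h9, if_neg hgt]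
        by_cases hd : mx < d
        · simp only [if_pos hd]
          have : ¬ ((i, d).2 = 9) := by simp; omega
          simp only [this, if_false]
          exact ih i d (i + 1) (by omega)
        · simp only [if_neg hd]
          have : ¬ ((pos, mx).2 = 9) := by simp; omega
          simp only [this, if_false]
          exact ih pos mx (i + 1) h

theorem foldl_max_pull (t : List Int) (d r : Int) :
    t.foldl max (max d r) = max d (t.foldl max r) := by
  induction t generalizing r with
  | nil => rfl
  | cons x t ih =>
    simp only [List.foldl_cons]
    rw [max_assoc, ih]

-- characterisation of the break-free loop by max? / index?
theorem loopN_char (xs : List Int) : ∀ pos mx i,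
    loopN xs pos mx i =
      match PySem.List.max? xs (fun y => y) with
      | none => (pos, mx)
      | some m => if mx < m then (i + (((PySem.List.index? xs m).getD 0 : Nat) : Int), m) else (pos, mx) := by
  induction xs with
  | nil => intro pos mx i; rfl
  | cons d rest ih =>
    intro pos mx i
    have hstep : loopN (d :: rest) pos mx i
        = if mx < d then loopN rest i d (i + 1) else loopN rest pos mx (i + 1) := rfl
    rw [hstep, PySem.List.max?_id_cons]
    cases rest with
    | nil =>
      by_cases hd : mx < d
      · simp [loopN, hd]
      · simp [loopN, hd]
    | cons r t =>
      have hmax : PySem.List.max? (r :: t) (fun y => y) = some (t.foldl max r) :=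
        PySem.List.max?_id_cons r t
      have hM : List.foldl max d (r :: t) = max d (t.foldl max r) := by
        simp only [List.foldl_cons]
        exact foldl_max_pull t d r
      have hmem : t.foldl max r ∈ r :: t := PySem.List.max?_mem hmax
      obtain ⟨k, hk⟩ : ∃ k, PySem.List.index? (r :: t) (List.foldl max r t) = some k :=
        Option.isSome_iff_exists.mp ((PySem.List.index?_isSome_iff _ _).mpr hmem)
      rw [hM]
      by_cases hd : mx < d
      · rw [if_pos hd, ih i d (i + 1), hmax]
        by_cases hdr : d < List.foldl max r t
        · have h2 : max d (List.foldl max r t) = List.foldl max r t := max_eq_right hdr.le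
          have hmxM : mx < List.foldl max r t := hd.trans hdr
          have hne : d ≠ List.foldl max r t := hdr.ne
          simp only [h2, if_pos hdr, if_pos hmxM, PySem.List.index?_cons_of_ne _ hne, hk,
            Option.map_some, Option.getD_some]
          refine Prod.ext ?_ rfl
          push_cast
          ring
        · have h2 : max d (List.foldl max r t) = d := max_eq_left (by omega)
          simp only [h2, if_neg hdr, if_pos hd, PySem.List.index?_cons_self, Option.getD_some]
          refine Prod.ext ?_ rfl
          simp
      · rw [if_neg hd, ih pos mx (i + 1), hmax]
        by_cases hmr : mx < List.foldl max r t
        · have h2 : max d (List.foldl max r t) = List.foldl max r t := max_eq_right (by omega)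
          have hne : d ≠ List.foldl max r t := by omega
          simp only [h2, if_pos hmr, PySem.List.index?_cons_of_ne _ hne, hk,
            Option.map_some, Option.getD_some]
          refine Prod.ext ?_ rfl
          push_cast
          ring
        · have hmxM : ¬ mx < max d (List.foldl max r t) := by
            rcases max_choice d (List.foldl max r t) with h | h <;> omega
          simp only [if_neg hmr, if_neg hmxM]

-- structural form of the cut: digits = p ++ 9 :: s with p all < 9
theorem trunc_of_no_cut (ds : List Int) :
    (¬ ∃ p s, ds = p ++ 9 :: s ∧ ∀ x ∈ p, x < 9) → truncAt9 ds = ds := by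
  induction ds with
  | nil => intro _; rfl
  | cons d rest ih =>
    intro h
    by_cases h9 : d = 9
    · exact absurd ⟨[], rest, by simp [h9]⟩ h
    · by_cases hgt : 9 < d
      · simp [truncAt9, h9, hgt]
      · have hrest : ¬ ∃ p s, rest = p ++ 9 :: s ∧ ∀ x ∈ p, x < 9 := by
          rintro ⟨p, s, rfl, hp⟩
          exact h ⟨d :: p, s, rfl, by
            intro x hx
            rcases List.mem_cons.mp hx with rfl | hx
            · omega
            · exact hp x hx⟩
        simp [truncAt9, h9, hgt, ih hrest]

theorem trunc_of_cut (p : List Int) (s : List Int) (hp : ∀ x ∈ p, x < 9) :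
    truncAt9 (p ++ 9 :: s) = p ++ [9] := by
  induction p with
  | nil => simp [truncAt9]
  | cons d t ih =>
    have hd : d < 9 := hp d (by simp)
    have h9 : ¬ d = 9 := by omega
    have hgt : ¬ 9 < d := by omega
    simp only [List.cons_append, truncAt9, if_neg h9, if_neg hgt]
    rw [ih (fun x hx => hp x (by simp [hx]))]

-- foldl max bounds
theorem foldl_max_le (l : List Int) : ∀ a c, a ≤ c → (∀ x ∈ l, x ≤ c) → l.foldl max a ≤ c := by
  induction l with
  | nil => intro a c h _; simpa using h
  | cons x t ih =>
    intro a c h hall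
    simp only [List.foldl_cons]
    exact ih _ c (max_le h (hall x (by simp))) (fun y hy => hall y (by simp [hy]))

-- max of p ++ 9 :: s is 9 when p < 9 and s ≤ 9
theorem max_of_cut (p s : List Int) (hp : ∀ x ∈ p, x < 9) (hs : ∀ x ∈ s, x ≤ 9) :
    PySem.List.max? (p ++ 9 :: s) (fun y => y) = some 9 := by
  cases hps : p ++ 9 :: s with
  | nil => simp at hps
  | cons x t =>
    rw [PySem.List.max?_id_cons]
    have hmem : (9 : Int) ∈ x :: t := by rw [← hps]; simp
    have hall : ∀ y ∈ x :: t, y ≤ 9 := by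
      rw [← hps]
      intro y hy
      rcases List.mem_append.mp hy with hy | hy
      · exact le_of_lt (hp y hy)
      · rcases List.mem_cons.mp hy with rfl | hy
        · omega
        · exact hs y hy
    have hle : List.foldl max x t ≤ 9 :=
      foldl_max_le t x 9 (hall x (by simp)) (fun y hy => hall y (by simp [hy]))
    have hge : 9 ≤ List.foldl max x t := by
      have := PySem.List.max?_isMax (PySem.List.max?_id_cons x t) 9 hmem
      simpa using this
    exact congrArg some (by omega)

theorem index9_of_cut (p s : List Int) (hp : ∀ x ∈ p, x < 9) :
    PySem.List.index? (p ++ 9 :: s) 9 = some p.length := by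
  induction p with
  | nil =>
    simp only [List.nil_append, List.length_nil]
    rw [PySem.List.index?_cons_self]
  | cons d t ih =>
    have hd : d ≠ (9 : Int) := by have := hp d (by simp); omega
    rw [List.cons_append, PySem.List.index?_cons_of_ne _ hd,
      ih (fun x hx => hp x (by simp [hx]))]
    simp

-- D's index form of the cut implies the structural decomposition, and conversely
theorem cut_of_D2 (ds : List Int) (i : Nat) (hi : i < ds.length)
    (h9 : ds.getD i 0 = 9) (hk : ∀ k < i, ds.getD k 0 < 9) :
    ∃ p s, ds = p ++ 9 :: s ∧ (∀ x ∈ p, x < 9) ∧ p.length = i := by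
  refine ⟨ds.take i, ds.drop (i + 1), ?_, ?_, List.length_take_of_le (le_of_lt hi)⟩
  · have hget : ds[i] = 9 := by
      rw [← h9]; exact (List.getD_eq_getElem ds 0 hi).symm
    calc ds = ds.take i ++ ds.drop i := (List.take_append_drop i ds).symm
      _ = ds.take i ++ (ds[i] :: ds.drop (i + 1)) := by rw [List.getElem_cons_drop hi]
      _ = ds.take i ++ 9 :: ds.drop (i + 1) := by rw [hget]
  · intro x hx
    obtain ⟨k, hklt, hkx⟩ := List.mem_take_iff_getElem.mp hx
    have hki : k < i := lt_of_lt_of_le hklt (by simp)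
    have hkd : k < ds.length := lt_trans hki hi
    have := hk k hki
    rw [List.getD_eq_getElem ds 0 hkd] at this
    rw [← hkx]
    simpa [hkd] using this

theorem D2_of_parts (p s : List Int) (hp : ∀ x ∈ p, x < 9) (d : Int) (hd : d ∈ s) (hd9 : 9 < d) :
    ∃ i < (p ++ 9 :: s).length, (p ++ 9 :: s).getD i 0 = 9 ∧
      (∀ k < i, (p ++ 9 :: s).getD k 0 < 9) ∧
      ∃ j < (p ++ 9 :: s).length, i < j ∧ 9 < (p ++ 9 :: s).getD j 0 := by
  obtain ⟨jj, hjj, hjd⟩ := List.mem_iff_getElem.mp hd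
  refine ⟨p.length, by simp, by simp, ?_, p.length + 1 + jj, by simp; omega, by omega, ?_⟩
  · intro k hkp
    rw [List.getD_append p (9 :: s) 0 k hkp, List.getD_eq_getElem _ 0 hkp]
    exact hp _ (List.getElem_mem hkp)
  · rw [List.getD_append_right p (9 :: s) 0 _ (by omega)]
    have hidxeq : p.length + 1 + jj - p.length = jj + 1 := by omega
    rw [hidxeq, List.getD_cons_succ, List.getD_eq_getElem _ 0 hjj, hjd]
    exact hd9

-- main equivalence outside D
theorem lm_eq_alt_of_not_D (digits : List Int) (hD : ¬ D_leftmost_largest digits) :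
    leftmost_largest digits = leftmost_largest_alt digits := by
  cases hdig : digits with
  | nil => rfl
  | cons d0 rest =>
    subst hdig
    have hne : (d0 :: rest : List Int) ≠ [] := by simp
    have hnd : ¬ ((∀ d ∈ d0 :: rest, d ≤ -1) ∨
        ∃ i < (d0 :: rest).length, (d0 :: rest).getD i 0 = 9 ∧
          (∀ k < i, (d0 :: rest).getD k 0 < 9) ∧
          ∃ j < (d0 :: rest).length, i < j ∧ 9 < (d0 :: rest).getD j 0) := by
      intro h; exact hD ⟨hne, h⟩
    push Not at hnd
    obtain ⟨hpos, hnocut⟩ := hnd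
    obtain ⟨e, he, hege⟩ := hpos
    by_cases hcut : ∃ p s, (d0 :: rest : List Int) = p ++ 9 :: s ∧ ∀ x ∈ p, x < 9
    · obtain ⟨p, s, hps, hp⟩ := hcut
      -- no element > 9 after the cut: all of s is ≤ 9
      have hs : ∀ x ∈ s, x ≤ 9 := by
        intro x hx
        by_contra hgt
        push Not at hgt
        obtain ⟨i, hi, h9, hk, j, hj, hij, hjgt⟩ :=
          D2_of_parts p s hp x hx hgt
        rw [← hps] at h9 hk hjgt hi hj
        have := hnocut i hi h9 hk j hj hij
        omega
      have hmaxpre : PySem.List.max? (p ++ [9]) (fun y => y) = some 9 := by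
        have := max_of_cut p [] hp (by simp)
        simpa using this
      have hidx : PySem.List.index? (p ++ 9 :: s) 9 = some p.length :=
        index9_of_cut p s hp
      have hidxpre : PySem.List.index? (p ++ [9]) 9 = some p.length := by
        have := index9_of_cut p [] hp
        simpa using this
      unfold leftmost_largest leftmost_largest_alt
      rw [lmLoop_low _ _ _ _ (by norm_num), loopN_char, hps, trunc_of_cut p s hp,
        max_of_cut p s hp hs, hmaxpre]
      rw [PySem.List.index?_eq_idxOf?] at hidx hidxpre
      simp [hidx, hidxpre]
    · have htr : truncAt9 (d0 :: rest) = d0 :: rest := trunc_of_no_cut _ hcut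
      unfold leftmost_largest leftmost_largest_alt
      rw [lmLoop_low _ _ _ _ (by norm_num), loopN_char, htr,
        PySem.List.max?_id_cons]
      have hge : e ≤ List.foldl max d0 rest := by
        have := PySem.List.max?_isMax (PySem.List.max?_id_cons d0 rest) e he
        simpa using this
      have hlt : (-1 : Int) < List.foldl max d0 rest := by omega
      simp [hne, hlt]

-- A ≠ B everywhere inside D
theorem lm_ne_alt_of_D (digits : List Int) (hD : D_leftmost_largest digits) :
    leftmost_largest digits ≠ leftmost_largest_alt digits := by
  obtain ⟨hne, hcase⟩ := hD
  cases hdig : digits with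
  | nil => exact absurd hdig hne
  | cons d0 rest =>
    subst hdig
    rcases hcase with hall | ⟨i, hi, h9, hk, j, hj, hij, hjgt⟩
    · -- all elements ≤ -1: A's loop never updates, B reports the real max at index ≥ 0
      have hA : leftmost_largest (d0 :: rest) = (-1, -1) := by
        unfold leftmost_largest
        have : ∀ (l : List Int), (∀ d ∈ l, d ≤ -1) → ∀ i, lmLoop l (-1) (-1) i = (-1, -1) := by
          intro l
          induction l with
          | nil => intro _ _; rfl
          | cons x t ih =>
            intro h i
            have hx : x ≤ -1 := h x (by simp)
            have hnl : ¬ ((-1 : Int) < x) := by omega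
            simp only [lmLoop, if_neg hnl]
            have : ¬ ((-1 : Int), (-1 : Int)).2 = 9 := by norm_num
            simp only [this, if_false]
            exact ih (fun y hy => h y (by simp [hy])) (i + 1)
        exact this _ hall 0
      rw [hA]
      unfold leftmost_largest_alt
      have hnn : (d0 :: rest : List Int) ≠ [] := by simp
      rw [if_neg hnn, PySem.List.max?_id_cons]
      intro hcontra
      have h1 : (0 : Int) ≤ (((PySem.List.index? (d0 :: rest)
          (List.foldl max d0 rest)).getD 0 : Nat) : Int) := by positivity
      have := congrArg Prod.fst hcontra
      simp only at this
      omega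
    · -- an early 9 hides a later > 9: A returns second component 9, B returns the max > 9
      obtain ⟨p, s, hps, hp, hplen⟩ := cut_of_D2 _ i hi h9 hk
      have hbig : 9 < (d0 :: rest).getD j 0 := hjgt
      have hjmem : (d0 :: rest).getD j 0 ∈ (d0 :: rest : List Int) := by
        rw [List.getD_eq_getElem _ 0 hj]
        exact List.getElem_mem hj
      have hA2 : (leftmost_largest (d0 :: rest)).2 = 9 := by
        unfold leftmost_largest
        rw [lmLoop_low _ _ _ _ (by norm_num), hps, trunc_of_cut p s hp, loopN_char]
        have hmaxpre : PySem.List.max? (p ++ [9]) (fun y => y) = some 9 := by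
          have := max_of_cut p [] hp (by simp)
          simpa using this
        rw [hmaxpre]
        norm_num
      have hB2 : 9 < (leftmost_largest_alt (d0 :: rest)).2 := by
        unfold leftmost_largest_alt
        have hnn : (d0 :: rest : List Int) ≠ [] := by simp
        rw [if_neg hnn, PySem.List.max?_id_cons]
        have := PySem.List.max?_isMax (PySem.List.max?_id_cons d0 rest) _ hjmem
        simp only at this ⊢
        omega
      intro hcontra
      rw [hcontra] at hA2
      omega

-- ===== VERDICT (by name: the statement is the Claim_ definition above) =====
theorem leftmost_largest_spec : Claim_unchanged_leftmost_largest := by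
  intro digits _
  unfold Spec_leftmost_largest
  exact lm_eq_alt_of_not_D digits

theorem leftmost_largest_changed : Claim_changed_leftmost_largest := by
  unfold Claim_changed_leftmost_largest; decide

theorem leftmost_largest_tight : Claim_exact_leftmost_largest := by
  intro digits _
  exact lm_ne_alt_of_D digits
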